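-- pv_equiv track=rewrite | github.com/Vanille-N/sylex | sylex.py | is_filename
-- ===== SOURCE A (Python) =====
-- def is_filename(s):
--     for c in s:
--         if not (
--             'a' <= c <= 'z' or
--             'A' <= c <= 'Z' or
--             c in "-_."
--         ):
--             return False
--     return True
-- ===== SOURCE B (Python) =====
-- _ALLOWED = "abcdefghijklmnopqrstuvwxyzABCDEFGHIJKLMNOPQRSTUVWXYZ-_."
-- # deletion table: maps every allowed character to None
-- _DELETE = str.maketrans("", "", _ALLOWED)
--
-- def is_filename(s):
--     # delete all allowed characters; s is valid iff nothing remains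
--     return s.translate(_DELETE) == ""
-- ===== Notes on version B (the rewrite author's own statement) =====
-- stated objective: faster
-- what changed: Replaces the character-by-character scan with early return by a whole-string transformation: a precomputed deletion translation table removes every allowed character via str.translate (C-level table lookup per char), and the result is valid iff the residue string is empty.
import Mathlib
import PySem

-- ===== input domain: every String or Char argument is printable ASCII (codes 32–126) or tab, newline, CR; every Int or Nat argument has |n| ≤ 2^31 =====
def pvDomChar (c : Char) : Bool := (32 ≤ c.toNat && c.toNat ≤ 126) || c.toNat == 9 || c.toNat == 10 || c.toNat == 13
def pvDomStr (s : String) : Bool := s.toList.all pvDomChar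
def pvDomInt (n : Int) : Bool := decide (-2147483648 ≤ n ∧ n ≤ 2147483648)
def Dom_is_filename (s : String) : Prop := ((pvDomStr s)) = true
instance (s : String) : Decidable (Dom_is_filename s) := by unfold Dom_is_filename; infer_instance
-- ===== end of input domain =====

-- B: instead of A's per-character scan with early return, B deletes every allowed character
-- from the string via a precomputed translation table and tests whether the residue is empty
-- (objective: alternative).

-- ===== PORT A =====
-- character test of A's if, in A's branch order
def pvCharOkA (c : Char) : Bool :=
  (decide ('a' ≤ c) && decide (c ≤ 'z')) ||
  (decide ('A' ≤ c) && decide (c ≤ 'Z')) ||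
  ("-_.".toList.contains c)

-- the 'for c in s: if not ok(c): return False' loop
def pvLoopA : List Char → Bool
  | [] => true
  | c :: rest => if !(pvCharOkA c) then false else pvLoopA rest

def is_filename (s : String) : Bool := pvLoopA s.toList

-- ===== PORT B =====
-- the deletion table's keys: str.maketrans("", "", _ALLOWED)
def pvDelChars : List Char :=
  "abcdefghijklmnopqrstuvwxyzABCDEFGHIJKLMNOPQRSTUVWXYZ-_.".toList

-- s.translate(_DELETE) with a pure-deletion table: keep exactly the chars not in the table
-- (exact: translate maps each char; table chars map to None and are dropped, others unchanged)
def pvTranslateDelete (l : List Char) : List Char :=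
  l.filter (fun c => !(pvDelChars.contains c))

-- s.translate(_DELETE) == ""
def is_filename_alt (s : String) : Bool := pvTranslateDelete s.toList == []

-- ===== PRECONDITION & SPEC =====
def Spec_is_filename (s : String) (out : Bool) : Prop := out = is_filename_alt s
instance (s : String) (out : Bool) : Decidable (Spec_is_filename s out) := by unfold Spec_is_filename; infer_instance

-- ===== CLAIM (what is proved, stated in full; the proofs are below) =====
def Claim_equal_is_filename : Prop := ∀ (s : String), Dom_is_filename s → Spec_is_filename s (is_filename s)

-- ===== LEMMAS AND PROOFS =====

lemma pvLoopA_eq_all (l : List Char) : pvLoopA l = l.all pvCharOkA := by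
  induction l with
  | nil => rfl
  | cons c rest ih =>
    simp only [pvLoopA, List.all_cons, ih]
    cases pvCharOkA c <;> simp

set_option maxRecDepth 40000 in
lemma pvContains_eq_ok (c : Char) (hd : pvDomChar c = true) :
    pvDelChars.contains c = pvCharOkA c := by
  have hle : c.toNat ≤ 126 := by
    simp only [pvDomChar, Bool.or_eq_true, Bool.and_eq_true, decide_eq_true_eq,
      beq_iff_eq] at hd
    omega
  have hc : c = Char.ofNat c.toNat := (Char.ofNat_toNat c).symm
  have key : ∀ n < 127,
      pvDelChars.contains (Char.ofNat n) = pvCharOkA (Char.ofNat n) := by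
    decide
  rw [hc]
  exact key c.toNat (by omega)

theorem is_filename_spec_aux (s : String) (hd : Dom_is_filename s) :
    is_filename s = is_filename_alt s := by
  unfold is_filename is_filename_alt pvTranslateDelete
  rw [pvLoopA_eq_all]
  unfold Dom_is_filename pvDomStr at hd
  rw [List.all_eq_true] at hd
  rw [Bool.eq_iff_iff]
  simp only [List.all_eq_true, beq_iff_eq, List.filter_eq_nil_iff,
    Bool.not_eq_eq_eq_not, Bool.not_true, Bool.not_eq_false]
  constructor
  · intro h c hc
    rw [pvContains_eq_ok c (hd c hc)]
    exact h c hc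
  · intro h c hc
    have := h c hc
    rwa [pvContains_eq_ok c (hd c hc)] at this

-- ===== VERDICT (by name: the statement is the Claim_ definition above) =====
theorem is_filename_spec : Claim_equal_is_filename := by
  intro s hd
  unfold Spec_is_filename
  exact is_filename_spec_aux s hd
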